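-- pv_equiv track=rewrite | github.com/skpark597/algorithm | python/src/year_twenty_five/october/minimum_subarrays_in_a_valid_split.py | valid_subarray_split
-- ===== SOURCE A (Python) =====
-- from math import gcd
--
-- INF = 10**5 + 1
--
-- def valid_subarray_split(nums: list[int]) -> int:
--     dp = [INF] * (len(nums) + 1)
--     dp[0] = 0
--     n = len(nums)
--
--     for i in range(1, n + 1):
--         for j in range(0, i):
--             if gcd(nums[j], nums[i - 1]) != 1:
--                 dp[i] = min(dp[i], dp[j] + 1)
--
--     return -1 if dp[n] == INF else dp[n]
-- ===== SOURCE B (Python) =====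
-- INF = 10**5 + 1
--
--
-- def _prime_factors(m):
--     """Distinct prime factors of m (m >= 1) by trial division."""
--     ps = []
--     d = 2
--     while d * d <= m:
--         if m % d == 0:
--             ps.append(d)
--             while m % d == 0:
--                 m //= d
--         d += 1
--     if m > 1:
--         ps.append(m)
--     return ps
--
--
-- def valid_subarray_split(nums: list[int]) -> int:
--     # dp[i] computed left to right; instead of scanning all j < i, keep
--     # best[p] = min dp[j] over earlier j whose |nums[j]| has prime factor p,
--     # best_zero = min dp[j] over earlier zeros,
--     # best_nonunit = min dp[j] over earlier j with |nums[j]| != 1.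
--     best = {}
--     best_zero = INF
--     best_nonunit = INF
--     dp = 0  # dp[0]
--     for v in nums:
--         a = abs(v)
--         # register j = i-1 (value v, dp value dp)
--         if a != 1:
--             best_nonunit = min(best_nonunit, dp)
--         fs = [] if v == 0 else _prime_factors(a)
--         if v == 0:
--             best_zero = min(best_zero, dp)
--         else:
--             for p in fs:
--                 best[p] = min(best.get(p, INF), dp)
--         # compute dp[i] with right endpoint v
--         if a == 1:
--             m = INF
--         elif v == 0:
--             m = best_nonunit
--         else:
--             m = best_zero
--             for p in fs:
--                 m = min(m, best.get(p, INF))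
--         dp = min(m + 1, INF)
--     return -1 if dp == INF else dp
-- ===== Notes on version B (the rewrite author's own statement) =====
-- stated objective: faster
-- what changed: Replaces the O(n^2) pairwise-gcd DP scan by a left-to-right DP that factorises each element once by trial division and keeps a per-prime table of minimum dp values (plus zero/non-unit minima), so the inner scan over all earlier indices disappears.
import Mathlib
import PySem

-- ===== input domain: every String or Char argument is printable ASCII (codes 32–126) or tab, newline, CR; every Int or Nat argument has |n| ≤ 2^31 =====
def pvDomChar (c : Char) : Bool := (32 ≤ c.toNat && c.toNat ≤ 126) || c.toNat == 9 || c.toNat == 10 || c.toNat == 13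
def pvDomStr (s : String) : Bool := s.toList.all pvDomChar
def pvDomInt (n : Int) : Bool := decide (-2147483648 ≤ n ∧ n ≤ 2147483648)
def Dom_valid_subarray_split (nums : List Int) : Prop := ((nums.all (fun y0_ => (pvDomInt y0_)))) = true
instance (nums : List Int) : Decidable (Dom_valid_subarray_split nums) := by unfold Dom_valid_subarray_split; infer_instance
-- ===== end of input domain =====

-- B replaces A's O(n^2) pairwise-gcd DP scan by a one-pass DP with a per-prime table of
-- minimum dp values (elements factorised once by trial division); proved to return A's value.

def INFA : Int := 10 ^ 5 + 1

-- ===== PORT A =====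
-- literal port of Source A: dp over prefixes, inner scan over all j < i testing gcd(nums[j], nums[i-1]) != 1
def valid_subarray_split (nums : List Int) : Int :=
  let n := nums.length
  let dp0 := (List.replicate (n + 1) INFA).set 0 0
  let dp := (List.range' 1 n).foldl (fun dp i =>
    (List.range i).foldl (fun dp j =>
      if Int.gcd (nums.getD j 0) (nums.getD (i - 1) 0) ≠ 1 then
        dp.set i (min (dp.getD i 0) (dp.getD j 0 + 1))
      else dp) dp) dp0
  if dp.getD n 0 = INFA then -1 else dp.getD n 0

-- ===== PORT B =====
-- helpers for B: trial-division factorisation (port of Source B's _prime_factors)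
-- strip all factors d out of m (the inner `while m % d == 0: m //= d`)
def stripFac (m d : Nat) : Nat :=
  if h : 2 ≤ d ∧ 0 < m ∧ d ∣ m then stripFac (m / d) d else m
termination_by m
decreasing_by exact Nat.div_lt_self h.2.1 (by omega)

theorem stripFac_le (m d : Nat) : stripFac m d ≤ m := by
  unfold stripFac
  split
  · next h => exact le_trans (stripFac_le (m / d) d) (Nat.div_le_self m d)
  · exact le_rfl
termination_by m
decreasing_by exact Nat.div_lt_self (by omega) (by omega)

-- the outer `while d * d <= m` loop of _prime_factors
def pfGo (m d : Nat) : List Nat :=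
  if hdd : d * d ≤ m then
    if m % d = 0 then d :: pfGo (stripFac m d) (d + 1)
    else pfGo m (d + 1)
  else if 1 < m then [m] else []
termination_by m + 1 - d
decreasing_by
  · have h1 := stripFac_le m d
    have h2 : d ≤ m := by
      rcases Nat.eq_zero_or_pos d with h0 | h0
      · omega
      · exact le_trans (Nat.le_mul_of_pos_left d h0) hdd
    omega
  · have h2 : d ≤ m := by
      rcases Nat.eq_zero_or_pos d with h0 | h0
      · omega
      · exact le_trans (Nat.le_mul_of_pos_left d h0) hdd
    omega

def primeFactorsTD (m : Nat) : List Nat := pfGo m 2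

-- port of Source B's valid_subarray_split: state = (best, best_zero, best_nonunit, dp)
def valid_subarray_split_alt (nums : List Int) : Int :=
  let st := nums.foldl
    (fun (st : PySem.Dict Int Int × Int × Int × Int) v =>
      let best := st.1
      let bz := st.2.1
      let bnu := st.2.2.1
      let dp := st.2.2.2
      let a := v.natAbs
      let bnu := if a ≠ 1 then min bnu dp else bnu
      let fs := if v = 0 then ([] : List Nat) else primeFactorsTD a
      let bz := if v = 0 then min bz dp else bz
      let best := if v = 0 then best
        else fs.foldl (fun b (p : Nat) => b.insert (p : Int) (min (b.getD (p : Int) INFA) dp)) best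
      let m := if a = 1 then INFA
        else if v = 0 then bnu
        else fs.foldl (fun m (p : Nat) => min m (best.getD (p : Int) INFA)) bz
      (best, bz, bnu, min (m + 1) INFA))
    (PySem.Dict.empty, INFA, INFA, 0)
  if st.2.2.2 = INFA then -1 else st.2.2.2

-- ===== PRECONDITION & SPEC =====
def Spec_valid_subarray_split (nums : List Int) (out : Int) : Prop := out = valid_subarray_split_alt nums
instance (nums : List Int) (out : Int) : Decidable (Spec_valid_subarray_split nums out) := by unfold Spec_valid_subarray_split; infer_instance

-- ===== CLAIM (what is proved, stated in full; the proofs are below) =====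
def Claim_equal_valid_subarray_split : Prop := ∀ (nums : List Int), Dom_valid_subarray_split nums → Spec_valid_subarray_split nums (valid_subarray_split nums)

-- ===== LEMMAS AND PROOFS =====

-- conditional minimum over a list of indices: the shared shape of every running minimum below
def cmin (l : List Nat) (P : Nat → Prop) [DecidablePred P] (f : Nat → Int) (a : Int) : Int :=
  l.foldl (fun m j => if P j then min m (f j) else m) a

theorem cmin_cons (k : Nat) (t : List Nat) (P : Nat → Prop) [DecidablePred P] (f : Nat → Int) (a : Int) :
    cmin (k :: t) P f a = cmin t P f (if P k then min a (f k) else a) := by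
  by_cases h : P k <;> simp [cmin, List.foldl_cons, h]

theorem cmin_le_init (l : List Nat) (P : Nat → Prop) [DecidablePred P] (f : Nat → Int) (a : Int) :
    cmin l P f a ≤ a := by
  induction l generalizing a with
  | nil => exact le_rfl
  | cons j t ih =>
      simp only [cmin, List.foldl_cons] at *
      split
      · exact le_trans (ih _) (min_le_left _ _)
      · exact ih _

theorem cmin_le_of_mem (l : List Nat) (P : Nat → Prop) [DecidablePred P] (f : Nat → Int) (a : Int)
    {j : Nat} (hj : j ∈ l) (hP : P j) : cmin l P f a ≤ f j := by
  induction l generalizing a with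
  | nil => simp at hj
  | cons k t ih =>
      simp only [cmin, List.foldl_cons] at *
      rcases List.mem_cons.mp hj with h | h
      · subst h
        rw [if_pos hP]
        exact le_trans (cmin_le_init t P f _) (min_le_right _ _)
      · exact ih _ h

theorem le_cmin (l : List Nat) (P : Nat → Prop) [DecidablePred P] (f : Nat → Int) (a b : Int)
    (ha : b ≤ a) (hf : ∀ j ∈ l, P j → b ≤ f j) : b ≤ cmin l P f a := by
  induction l generalizing a with
  | nil => exact ha
  | cons k t ih =>
      rw [cmin_cons]
      split
      · next h =>
          exact ih _ (le_min ha (hf k (List.mem_cons_self) h)) (fun j hj => hf j (List.mem_cons_of_mem _ hj))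
      · exact ih _ ha (fun j hj => hf j (List.mem_cons_of_mem _ hj))

theorem cmin_eq_init_or (l : List Nat) (P : Nat → Prop) [DecidablePred P] (f : Nat → Int) (a : Int) :
    cmin l P f a = a ∨ ∃ j ∈ l, P j ∧ cmin l P f a = f j := by
  induction l generalizing a with
  | nil => exact Or.inl rfl
  | cons k t ih =>
      rw [cmin_cons]
      split
      · next h =>
          rcases ih (min a (f k)) with h1 | ⟨j, hj, hPj, hv⟩
          · rcases le_total a (f k) with hle | hle
            · left; rw [h1]; exact min_eq_left hle
            · right; exact ⟨k, List.mem_cons_self, h, by rw [h1]; exact min_eq_right hle⟩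
          · right; exact ⟨j, List.mem_cons_of_mem _ hj, hPj, hv⟩
      · rcases ih a with h1 | ⟨j, hj, hPj, hv⟩
        · exact Or.inl h1
        · exact Or.inr ⟨j, List.mem_cons_of_mem _ hj, hPj, hv⟩

theorem cmin_congr (l : List Nat) (P Q : Nat → Prop) [DecidablePred P] [DecidablePred Q]
    (f g : Nat → Int) (a : Int) (hPQ : ∀ j ∈ l, P j ↔ Q j) (hfg : ∀ j ∈ l, f j = g j) :
    cmin l P f a = cmin l Q g a := by
  induction l generalizing a with
  | nil => rfl
  | cons k t ih =>
      rw [cmin_cons, cmin_cons]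
      have hk : P k ↔ Q k := hPQ k List.mem_cons_self
      have hfk : f k = g k := hfg k List.mem_cons_self
      by_cases h : P k
      · rw [if_pos h, if_pos (hk.mp h), hfk]
        exact ih _ (fun j hj => hPQ j (List.mem_cons_of_mem _ hj)) (fun j hj => hfg j (List.mem_cons_of_mem _ hj))
      · rw [if_neg h, if_neg (fun hq => h (hk.mpr hq))]
        exact ih _ (fun j hj => hPQ j (List.mem_cons_of_mem _ hj)) (fun j hj => hfg j (List.mem_cons_of_mem _ hj))

theorem cmin_of_not (l : List Nat) (P : Nat → Prop) [DecidablePred P] (f : Nat → Int) (a : Int)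
    (h : ∀ j ∈ l, ¬ P j) : cmin l P f a = a := by
  induction l generalizing a with
  | nil => rfl
  | cons k t ih =>
      rw [cmin_cons, if_neg (h k List.mem_cons_self)]
      exact ih _ (fun j hj => h j (List.mem_cons_of_mem _ hj))

theorem cmin_append (l1 l2 : List Nat) (P : Nat → Prop) [DecidablePred P] (f : Nat → Int) (a : Int) :
    cmin (l1 ++ l2) P f a = cmin l2 P f (cmin l1 P f a) := by
  simp [cmin, List.foldl_append]

-- folding min over (f j + 1) capped at INFA equals the capped successor of the folded min
theorem cmin_plus_one (l : List Nat) (P : Nat → Prop) [DecidablePred P] (f : Nat → Int) (a : Int) :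
    l.foldl (fun m j => if P j then min m (f j + 1) else m) (min (a + 1) INFA)
      = min (cmin l P f a + 1) INFA := by
  induction l generalizing a with
  | nil => rfl
  | cons k t ih =>
      simp only [cmin, List.foldl_cons] at *
      by_cases h : P k
      · rw [if_pos h, if_pos h]
        have : min (min (a + 1) INFA) (f k + 1) = min (min a (f k) + 1) INFA := by omega
        rw [this]
        exact ih _
      · rw [if_neg h, if_neg h]
        exact ih _

-- ---------- trial-division factorisation: soundness & completeness ----------

theorem stripFac_dvd (m d : Nat) : stripFac m d ∣ m := by
  unfold stripFac
  split
  · next h => exact dvd_trans (stripFac_dvd (m / d) d) (Nat.div_dvd_of_dvd h.2.2)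
  · exact dvd_rfl
termination_by m
decreasing_by exact Nat.div_lt_self (by omega) (by omega)

theorem stripFac_pos (m d : Nat) (hm : 0 < m) : 0 < stripFac m d := by
  unfold stripFac
  split
  · next h => exact stripFac_pos (m / d) d (Nat.div_pos (Nat.le_of_dvd hm h.2.2) (by omega))
  · exact hm
termination_by m
decreasing_by exact Nat.div_lt_self (by omega) (by omega)

theorem not_dvd_stripFac (m d : Nat) (hm : 0 < m) (hd : 2 ≤ d) : ¬ d ∣ stripFac m d := by
  unfold stripFac
  split
  · next h => exact not_dvd_stripFac (m / d) d (Nat.div_pos (Nat.le_of_dvd hm h.2.2) (by omega)) hd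
  · next h =>
      intro hdvd
      exact h ⟨hd, hm, hdvd⟩
termination_by m
decreasing_by exact Nat.div_lt_self (by omega) (by omega)

theorem prime_dvd_stripFac (m d p : Nat) (hm : 0 < m) (hd : d.Prime) (hp : p.Prime) (hpd : p ≠ d)
    (hdvd : p ∣ m) : p ∣ stripFac m d := by
  unfold stripFac
  split
  · next h =>
      apply prime_dvd_stripFac (m / d) d p (Nat.div_pos (Nat.le_of_dvd hm h.2.2) (by omega)) hd hp hpd
      have hmd : m / d * d = m := Nat.div_mul_cancel h.2.2
      rcases (Nat.Prime.dvd_mul hp).mp (hmd ▸ hdvd) with h1 | h1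
      · exact h1
      · exact absurd ((Nat.prime_dvd_prime_iff_eq hp hd).mp h1) hpd
  · exact hdvd
termination_by m
decreasing_by exact Nat.div_lt_self (by omega) (by omega)

theorem pfGo_mem : ∀ (m d : Nat), 0 < m → 2 ≤ d → (∀ q, q.Prime → q ∣ m → d ≤ q) →
    ∀ p, p ∈ pfGo m d ↔ p.Prime ∧ p ∣ m := by
  intro m d
  induction m, d using pfGo.induct with
  | case1 m d hdd hmod ih =>
      intro hm hd hinv p
      have hddvd : d ∣ m := Nat.dvd_of_mod_eq_zero hmod
      have hdprime : d.Prime := by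
        refine Nat.prime_def.mpr ⟨hd, fun e hed => ?_⟩
        by_cases he1 : e = 1
        · exact Or.inl he1
        · obtain ⟨q, hq, hqe⟩ := Nat.exists_prime_and_dvd he1
          have he0 : 0 < e := by
            rcases Nat.eq_zero_or_pos e with h0 | h0
            · subst h0; have := Nat.eq_zero_of_zero_dvd hed; omega
            · exact h0
          have hqd : q ∣ d := hqe.trans hed
          have h1 : d ≤ q := hinv q hq (hqd.trans hddvd)
          have h2 : q ≤ e := Nat.le_of_dvd he0 hqe
          have h3 : e ≤ d := Nat.le_of_dvd (by omega) hed
          exact Or.inr (by omega)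
      have spos := stripFac_pos m d hm
      have sdvd := stripFac_dvd m d
      have snd := not_dvd_stripFac m d hm hd
      have hinv' : ∀ q, q.Prime → q ∣ stripFac m d → d + 1 ≤ q := by
        intro q hq hqs
        have h1 : d ≤ q := hinv q hq (hqs.trans sdvd)
        rcases Nat.lt_or_ge d q with h2 | h2
        · omega
        · have : q = d := by omega
          subst this
          exact absurd hqs snd
      rw [show pfGo m d = d :: pfGo (stripFac m d) (d + 1) from by
        rw [pfGo]; rw [dif_pos hdd, if_pos hmod]]
      rw [List.mem_cons, ih spos (by omega) hinv' p]
      constructor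
      · rintro (rfl | ⟨h1, h2⟩)
        · exact ⟨hdprime, hddvd⟩
        · exact ⟨h1, h2.trans sdvd⟩
      · rintro ⟨hp, hpm⟩
        by_cases hpd : p = d
        · exact Or.inl hpd
        · exact Or.inr ⟨hp, prime_dvd_stripFac m d p hm hdprime hp hpd hpm⟩
  | case2 m d hdd hmod ih =>
      intro hm hd hinv p
      have hinv' : ∀ q, q.Prime → q ∣ m → d + 1 ≤ q := by
        intro q hq hqm
        have h1 : d ≤ q := hinv q hq hqm
        rcases Nat.lt_or_ge d q with h2 | h2
        · omega
        · have : q = d := by omega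
          subst this
          exact absurd (Nat.mod_eq_zero_of_dvd hqm) hmod
      rw [show pfGo m d = pfGo m (d + 1) from by rw [pfGo]; rw [dif_pos hdd, if_neg hmod]]
      exact ih hm (by omega) hinv' p
  | case3 m d hdd hm1 =>
      intro hm hd hinv p
      have hmprime : m.Prime := by
        obtain ⟨q, hq, hqm⟩ := Nat.exists_prime_and_dvd (by omega : m ≠ 1)
        have hdq : d ≤ q := hinv q hq hqm
        obtain ⟨r, hr⟩ := hqm
        have hr0 : 0 < r := by
          rcases Nat.eq_zero_or_pos r with h0 | h0
          · subst h0; omega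
          · exact h0
        rcases Nat.eq_or_lt_of_le hr0 with h1 | h1
        · have : m = q := by rw [hr, ← h1, Nat.mul_one]
          exact this ▸ hq
        · exfalso
          obtain ⟨q', hq', hq'r⟩ := Nat.exists_prime_and_dvd (by omega : r ≠ 1)
          have hdq' : d ≤ q' := hinv q' hq' (hq'r.trans ⟨q, by rw [hr, Nat.mul_comm]⟩)
          have h2 : q' ≤ r := Nat.le_of_dvd (by omega) hq'r
          have h3 : d * d ≤ q * q' := Nat.mul_le_mul hdq hdq'
          have h4 : q * q' ≤ q * r := Nat.mul_le_mul_left q h2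
          exact hdd (by omega)
      rw [show pfGo m d = [m] from by rw [pfGo]; rw [dif_neg hdd, if_pos hm1]]
      simp only [List.mem_singleton]
      constructor
      · rintro rfl; exact ⟨hmprime, dvd_rfl⟩
      · rintro ⟨hp, hpm⟩
        exact ((Nat.prime_dvd_prime_iff_eq hp hmprime).mp hpm)
  | case4 m d hdd hm1 =>
      intro hm hd hinv p
      have : m = 1 := by omega
      subst this
      rw [show pfGo 1 d = [] from by rw [pfGo]; rw [dif_neg hdd, if_neg hm1]]
      simp only [List.not_mem_nil, false_iff]
      rintro ⟨hp, hpm⟩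
      exact hp.ne_one (Nat.eq_one_of_dvd_one hpm)

theorem primeFactorsTD_mem (m : Nat) (hm : 0 < m) (p : Nat) :
    p ∈ primeFactorsTD m ↔ p.Prime ∧ p ∣ m := by
  exact pfGo_mem m 2 hm le_rfl (fun q hq _ => hq.two_le) p

-- ---------- the reference dp table ----------

-- one dp step: minimum dp[j] over j < t.length with gcd(nums[j], v) != 1
def mstep (nums : List Int) (t : List Int) (v : Int) : Int :=
  cmin (List.range t.length) (fun j => Int.gcd (nums.getD j 0) v ≠ 1) (fun j => t.getD j 0) INFA

def dpL (nums : List Int) : Nat → List Int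
  | 0 => [0]
  | i + 1 => dpL nums i ++ [min (mstep nums (dpL nums i) (nums.getD i 0) + 1) INFA]

theorem dpL_length (nums : List Int) (i : Nat) : (dpL nums i).length = i + 1 := by
  induction i with
  | zero => rfl
  | succ k ih => simp [dpL, ih]

def dpV (nums : List Int) (j : Nat) : Int := (dpL nums j).getD j 0

theorem dpL_getD (nums : List Int) {j i : Nat} (h : j ≤ i) :
    (dpL nums i).getD j 0 = dpV nums j := by
  induction i with
  | zero => interval_cases j; rfl
  | succ k ih =>
      rcases Nat.lt_or_ge j (k + 1) with hlt | hge
      · rw [show (dpL nums (k+1)) = dpL nums k ++ [_] from rfl,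
          List.getD_append _ _ _ _ (by rw [dpL_length]; omega)]
        exact ih (by omega)
      · have hj : j = k + 1 := by omega
        subst hj
        rfl

theorem dpV_succ (nums : List Int) (e : Nat) :
    dpV nums (e + 1) = min (mstep nums (dpL nums e) (nums.getD e 0) + 1) INFA := by
  show (dpL nums e ++ [_]).getD (e+1) 0 = _
  rw [List.getD_append_right _ _ _ _ (by rw [dpL_length])]
  simp [dpL_length]

theorem mstep_eq_cmin (nums : List Int) (e : Nat) (v : Int) :
    mstep nums (dpL nums e) v
      = cmin (List.range (e + 1)) (fun j => Int.gcd (nums.getD j 0) v ≠ 1) (dpV nums) INFA := by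
  unfold mstep
  rw [dpL_length]
  exact cmin_congr _ _ _ _ _ _ (fun j _ => Iff.rfl)
    (fun j hj => dpL_getD nums (by simpa using Nat.lt_succ_iff.mp (List.mem_range.mp hj)))

-- ---------- A-side characterisation ----------

theorem cmin_true (l : List Nat) (f : Nat → Int) (a : Int) :
    l.foldl (fun m j => min m (f j)) a = cmin l (fun _ => True) f a := by
  simp [cmin]

theorem cmin_plus_one' (l : List Nat) (P : Nat → Prop) [DecidablePred P] (f : Nat → Int) :
    l.foldl (fun m j => if P j then min m (f j + 1) else m) INFA
      = min (cmin l P f INFA + 1) INFA := by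
  have h := cmin_plus_one l P f INFA
  rw [show min ((INFA : Int) + 1) INFA = INFA from by omega] at h
  exact h

theorem gcd_ne_one_iff (u v : Int) : Int.gcd u v ≠ 1 ↔ ∃ p, p.Prime ∧ p ∣ u.natAbs ∧ p ∣ v.natAbs :=
  Nat.Prime.not_coprime_iff_dvd

theorem innerA (nums : List Int) (L R : List Int) (v : Int) (js : List Nat) (c : Int)
    (h : ∀ j ∈ js, j < L.length) :
    js.foldl (fun dp j =>
        if Int.gcd (nums.getD j 0) v ≠ 1 then
          dp.set L.length (min (dp.getD L.length 0) (dp.getD j 0 + 1))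
        else dp) (L ++ c :: R)
      = L ++ (js.foldl (fun c j => if Int.gcd (nums.getD j 0) v ≠ 1 then min c (L.getD j 0 + 1) else c) c) :: R := by
  induction js generalizing c with
  | nil => rfl
  | cons j t ih =>
      simp only [List.foldl_cons]
      have hj : j < L.length := h j List.mem_cons_self
      have hget1 : (L ++ c :: R).getD L.length 0 = c := by
        rw [List.getD_append_right _ _ _ _ le_rfl, Nat.sub_self]
        rfl
      have hget2 : (L ++ c :: R).getD j 0 = L.getD j 0 := List.getD_append _ _ _ _ hj
      have hset : (L ++ c :: R).set L.length (min c (L.getD j 0 + 1))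
          = L ++ (min c (L.getD j 0 + 1)) :: R := by
        rw [List.set_append, if_neg (lt_irrefl _), Nat.sub_self]
        rfl
      by_cases hc : Int.gcd (nums.getD j 0) v ≠ 1
      · rw [if_pos hc, if_pos hc, hget1, hget2, hset]
        exact ih _ (fun j hj => h j (List.mem_cons_of_mem _ hj))
      · rw [if_neg hc, if_neg hc]
        exact ih _ (fun j hj => h j (List.mem_cons_of_mem _ hj))

theorem outerA (nums : List Int) (k : Nat) (hk : k ≤ nums.length) :
    (List.range' 1 k).foldl (fun dp i =>
      (List.range i).foldl (fun dp j =>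
        if Int.gcd (nums.getD j 0) (nums.getD (i - 1) 0) ≠ 1 then
          dp.set i (min (dp.getD i 0) (dp.getD j 0 + 1))
        else dp) dp) ((List.replicate (nums.length + 1) INFA).set 0 0)
      = dpL nums k ++ List.replicate (nums.length - k) INFA := by
  induction k with
  | zero =>
      simp [dpL, List.replicate_succ]
  | succ k ih =>
      rw [List.range'_concat, List.foldl_append, ih (by omega)]
      simp only [List.foldl_cons, List.foldl_nil]
      have hrep : nums.length - k = (nums.length - (k + 1)) + 1 := by omega
      rw [hrep, List.replicate_succ]
      have hL : (dpL nums k).length = k + 1 := dpL_length nums k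
      have h2' : (dpL nums k).length - 1 = k := by omega
      have h1 : 1 + 1 * k = (dpL nums k).length := by omega
      simp only [h1, h2']
      rw [innerA nums (dpL nums k) _ _ _ INFA (fun j hj => by
        have := List.mem_range.mp hj; omega)]
      rw [cmin_plus_one' (List.range (dpL nums k).length)
        (fun j => Int.gcd (nums.getD j 0) (nums.getD k 0) ≠ 1) (fun j => (dpL nums k).getD j 0)]
      rw [show dpL nums (k + 1)
          = dpL nums k ++ [min (mstep nums (dpL nums k) (nums.getD k 0) + 1) INFA] from rfl]
      rw [List.append_assoc]
      rfl

theorem A_eq (nums : List Int) :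
    valid_subarray_split nums = if dpV nums nums.length = INFA then -1 else dpV nums nums.length := by
  simp only [valid_subarray_split]
  rw [outerA nums nums.length le_rfl]
  simp only [Nat.sub_self, List.replicate_zero, List.append_nil]
  rfl

-- ---------- B-side characterisation ------------ ---------- B-side characterisation ----------

def Zf (nums : List Int) (e : Nat) : Int :=
  cmin (List.range e) (fun j => nums.getD j 0 = 0) (dpV nums) INFA
def Uf (nums : List Int) (e : Nat) : Int :=
  cmin (List.range e) (fun j => (nums.getD j 0).natAbs ≠ 1) (dpV nums) INFA
def Bf (nums : List Int) (e : Nat) (p : Int) : Int :=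
  cmin (List.range e)
    (fun j => nums.getD j 0 ≠ 0 ∧ ∃ q ∈ primeFactorsTD (nums.getD j 0).natAbs, (q : Int) = p)
    (dpV nums) INFA

theorem foldl_index {σ : Type} (nums : List Int) (f : σ → Int → σ) (z : σ) :
    nums.foldl f z = (List.range nums.length).foldl (fun s j => f s (nums.getD j 0)) z := by
  induction nums using List.reverseRecOn with
  | nil => rfl
  | append_singleton ms x ih =>
      simp only [List.foldl_append, List.length_append, List.length_cons, List.length_nil,
        Nat.zero_add, List.range_succ, List.foldl_cons, List.foldl_nil]
      rw [PySem.List.foldl_congr_mem _ _ (fun s j => f s (ms.getD j 0)) z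
        (fun acc j hj => by rw [List.getD_append _ _ _ _ (List.mem_range.mp hj)]), ← ih,
        List.getD_append_right _ _ _ _ le_rfl, Nat.sub_self]
      rfl

theorem getD_foldl_insert_min (fs : List Nat) (b : PySem.Dict Int Int) (dp : Int) (p : Int) :
    (fs.foldl (fun b q => b.insert (q : Int) (min (b.getD (q : Int) INFA) dp)) b).getD p INFA
      = if ∃ q ∈ fs, (q : Int) = p then min (b.getD p INFA) dp else b.getD p INFA := by
  induction fs generalizing b with
  | nil => simp
  | cons q t ih =>
      simp only [List.foldl_cons]
      rw [ih]
      by_cases hqp : (q : Int) = p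
      · subst hqp
        rw [PySem.Dict.getD_insert_self]
        by_cases ht : ∃ q' ∈ t, (q' : Int) = (q : Int)
        · rw [if_pos ht, if_pos ⟨q, List.mem_cons_self, rfl⟩]
          omega
        · rw [if_neg ht, if_pos ⟨q, List.mem_cons_self, rfl⟩]
      · have hiff : (∃ q' ∈ q :: t, (q' : Int) = p) ↔ (∃ q' ∈ t, (q' : Int) = p) := by
          constructor
          · rintro ⟨q', hq', he⟩
            rcases List.mem_cons.mp hq' with rfl | hm
            · exact absurd he hqp
            · exact ⟨q', hm, he⟩
          · rintro ⟨q', hm, he⟩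
            exact ⟨q', List.mem_cons_of_mem _ hm, he⟩
        rw [PySem.Dict.getD_insert_of_ne _ _ _ (Ne.symm hqp)]
        by_cases ht : ∃ q' ∈ t, (q' : Int) = p
        · rw [if_pos ht, if_pos (hiff.mpr ht)]
        · rw [if_neg ht, if_neg (fun hh => ht (hiff.mp hh))]

-- the crux: B's per-prime minimum equals A's pairwise-gcd minimum
theorem crux (nums : List Int) (i : Nat) (v : Int) :
    (if v.natAbs = 1 then INFA
     else if v = 0 then Uf nums i
     else cmin (primeFactorsTD v.natAbs) (fun _ => True) (fun q => Bf nums i (q : Int)) (Zf nums i))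
    = cmin (List.range i) (fun j => Int.gcd (nums.getD j 0) v ≠ 1) (dpV nums) INFA := by
  by_cases ha1 : v.natAbs = 1
  · rw [if_pos ha1, eq_comm]
    apply cmin_of_not
    intro j _ hP
    apply hP
    show (nums.getD j 0).natAbs.gcd v.natAbs = 1
    rw [ha1, Nat.gcd_one_right]
  · rw [if_neg ha1]
    by_cases hv0 : v = 0
    · rw [if_pos hv0]
      apply cmin_congr
      · intro j _
        subst hv0
        rw [Int.gcd_zero_right]
      · intro j _
        rfl
    · rw [if_neg hv0]
      have hva : 1 < v.natAbs := by
        rcases Nat.eq_zero_or_pos v.natAbs with h0 | h0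
        · exact absurd (Int.natAbs_eq_zero.mp h0) hv0
        · omega
      apply le_antisymm
      · rcases cmin_eq_init_or (List.range i)
            (fun j => Int.gcd (nums.getD j 0) v ≠ 1) (dpV nums) INFA with hR | ⟨j, hjm, hPj, hR⟩
        · rw [hR]
          exact le_trans (cmin_le_init _ _ _ _) (cmin_le_init _ _ _ _)
        · rw [hR]
          by_cases hz : nums.getD j 0 = 0
          · have h1 : Zf nums i ≤ dpV nums j := cmin_le_of_mem _ _ _ _ hjm hz
            exact le_trans (cmin_le_init _ _ _ _) h1
          · obtain ⟨p, hp, hpu, hpv⟩ := (gcd_ne_one_iff _ _).mp hPj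
            have hpfs : p ∈ primeFactorsTD v.natAbs :=
              (primeFactorsTD_mem _ (by omega) p).mpr ⟨hp, hpv⟩
            have hpj : p ∈ primeFactorsTD (nums.getD j 0).natAbs :=
              (primeFactorsTD_mem _ (Int.natAbs_pos.mpr hz) p).mpr ⟨hp, hpu⟩
            have h1 : Bf nums i (p : Int) ≤ dpV nums j :=
              cmin_le_of_mem _ _ _ _ hjm ⟨hz, p, hpj, rfl⟩
            have h2 : cmin (primeFactorsTD v.natAbs) (fun _ => True)
                (fun q => Bf nums i (q : Int)) (Zf nums i) ≤ Bf nums i (p : Int) :=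
              cmin_le_of_mem _ _ _ _ hpfs trivial
            exact le_trans h2 h1
      · apply le_cmin
        · rcases cmin_eq_init_or (List.range i)
              (fun j => nums.getD j 0 = 0) (dpV nums) INFA with hZ | ⟨j, hjm, hPj, hZ⟩
          · show _ ≤ Zf nums i
            rw [Zf, hZ]
            exact cmin_le_init _ _ _ _
          · show _ ≤ Zf nums i
            rw [Zf, hZ]
            apply cmin_le_of_mem _ _ _ _ hjm
            show Int.gcd (nums.getD j 0) v ≠ 1
            rw [hPj, Int.gcd_zero_left]
            exact ha1
        · intro q hq _
          rcases cmin_eq_init_or (List.range i)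
              (fun j => nums.getD j 0 ≠ 0 ∧ ∃ q' ∈ primeFactorsTD (nums.getD j 0).natAbs,
                (q' : Int) = (q : Int)) (dpV nums) INFA with hB | ⟨j, hjm, hPj, hB⟩
          · show _ ≤ Bf nums i (q : Int)
            rw [Bf, hB]
            exact cmin_le_init _ _ _ _
          · show _ ≤ Bf nums i (q : Int)
            rw [Bf, hB]
            obtain ⟨hz, q', hq', hcast⟩ := hPj
            have hq'q : q' = q := by exact_mod_cast hcast
            subst hq'q
            have hqv := (primeFactorsTD_mem _ (by omega : 0 < v.natAbs) q').mp hq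
            apply cmin_le_of_mem _ _ _ _ hjm
            exact (gcd_ne_one_iff _ _).mpr ⟨q', hqv.1,
              ((primeFactorsTD_mem _ (Int.natAbs_pos.mpr hz) q').mp hq').2, hqv.2⟩

theorem Zf_succ (nums : List Int) (e : Nat) :
    Zf nums (e + 1)
      = if nums.getD e 0 = 0 then min (Zf nums e) (dpV nums e) else Zf nums e := by
  rw [Zf, Zf, List.range_succ, cmin_append, cmin_cons]
  rfl

theorem Uf_succ (nums : List Int) (e : Nat) :
    Uf nums (e + 1)
      = if (nums.getD e 0).natAbs ≠ 1 then min (Uf nums e) (dpV nums e) else Uf nums e := by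
  rw [Uf, Uf, List.range_succ, cmin_append, cmin_cons]
  rfl

theorem Bf_succ (nums : List Int) (e : Nat) (p : Int) :
    Bf nums e.succ p
      = if nums.getD e 0 ≠ 0 ∧ ∃ q ∈ primeFactorsTD (nums.getD e 0).natAbs, (q : Int) = p then
          min (Bf nums e p) (dpV nums e)
        else Bf nums e p := by
  rw [Bf, Bf, List.range_succ, cmin_append, cmin_cons]
  rfl

-- the foldl step of the B port, as a function of the index (proof-side mirror of the port's lambda)
def stepB (nums : List Int) (st : PySem.Dict Int Int × Int × Int × Int) (j : Nat) :
    PySem.Dict Int Int × Int × Int × Int :=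
  (fun (st : PySem.Dict Int Int × Int × Int × Int) (v : Int) =>
      let best := st.1
      let bz := st.2.1
      let bnu := st.2.2.1
      let dp := st.2.2.2
      let a := v.natAbs
      let bnu := if a ≠ 1 then min bnu dp else bnu
      let fs := if v = 0 then ([] : List Nat) else primeFactorsTD a
      let bz := if v = 0 then min bz dp else bz
      let best := if v = 0 then best
        else fs.foldl (fun b (p : Nat) => b.insert (p : Int) (min (b.getD (p : Int) INFA) dp)) best
      let m := if a = 1 then INFA
        else if v = 0 then bnu
        else fs.foldl (fun m (p : Nat) => min m (best.getD (p : Int) INFA)) bz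
      (best, bz, bnu, min (m + 1) INFA)) st (nums.getD j 0)

theorem stepB_best (nums : List Int) (st : PySem.Dict Int Int × Int × Int × Int) (j : Nat) :
    (stepB nums st j).1
      = (if nums.getD j 0 = 0 then st.1
         else (if nums.getD j 0 = 0 then ([] : List Nat)
             else primeFactorsTD (nums.getD j 0).natAbs).foldl
           (fun b (q : Nat) => b.insert (q : Int) (min (b.getD (q : Int) INFA) st.2.2.2)) st.1) := rfl

theorem stepB_bz (nums : List Int) (st : PySem.Dict Int Int × Int × Int × Int) (j : Nat) :
    (stepB nums st j).2.1
      = (if nums.getD j 0 = 0 then min st.2.1 st.2.2.2 else st.2.1) := rfl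

theorem stepB_bnu (nums : List Int) (st : PySem.Dict Int Int × Int × Int × Int) (j : Nat) :
    (stepB nums st j).2.2.1
      = (if (nums.getD j 0).natAbs ≠ 1 then min st.2.2.1 st.2.2.2 else st.2.2.1) := rfl

theorem stepB_dp (nums : List Int) (st : PySem.Dict Int Int × Int × Int × Int) (j : Nat) :
    (stepB nums st j).2.2.2
      = min ((if (nums.getD j 0).natAbs = 1 then INFA
          else if nums.getD j 0 = 0 then
            (if (nums.getD j 0).natAbs ≠ 1 then min st.2.2.1 st.2.2.2 else st.2.2.1)
          else (if nums.getD j 0 = 0 then ([] : List Nat)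
              else primeFactorsTD (nums.getD j 0).natAbs).foldl
            (fun m (q : Nat) => min m
              (((if nums.getD j 0 = 0 then st.1
                 else (if nums.getD j 0 = 0 then ([] : List Nat)
                     else primeFactorsTD (nums.getD j 0).natAbs).foldl
                   (fun b (q : Nat) => b.insert (q : Int) (min (b.getD (q : Int) INFA) st.2.2.2)) st.1)).getD (q : Int) INFA))
            (if nums.getD j 0 = 0 then min st.2.1 st.2.2.2 else st.2.1)) + 1) INFA := rfl

theorem B_inv (nums : List Int) (e : Nat) :
    ((List.range e).foldl (stepB nums) (PySem.Dict.empty, INFA, INFA, 0)).2.1 = Zf nums e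
    ∧ ((List.range e).foldl (stepB nums) (PySem.Dict.empty, INFA, INFA, 0)).2.2.1 = Uf nums e
    ∧ ((List.range e).foldl (stepB nums) (PySem.Dict.empty, INFA, INFA, 0)).2.2.2 = dpV nums e
    ∧ ∀ p : Int,
        ((List.range e).foldl (stepB nums) (PySem.Dict.empty, INFA, INFA, 0)).1.getD p INFA
          = Bf nums e p := by
  induction e with
  | zero => exact ⟨rfl, rfl, rfl, fun p => rfl⟩
  | succ e ih =>
      obtain ⟨h1, h2, h3, h4⟩ := ih
      rw [List.range_succ, List.foldl_append, List.foldl_cons, List.foldl_nil]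
      set st := (List.range e).foldl (stepB nums) (PySem.Dict.empty, INFA, INFA, 0) with hst
      have hbest : ∀ p : Int, (stepB nums st e).1.getD p INFA = Bf nums (e + 1) p := by
        intro p
        rw [stepB_best, h3]
        by_cases hv0 : nums.getD e 0 = 0
        · simp only [if_pos hv0]
          rw [h4, Bf_succ, if_neg (fun hc => hc.1 hv0)]
        · simp only [if_neg hv0]
          rw [getD_foldl_insert_min, h4, Bf_succ]
          by_cases hex : ∃ q ∈ primeFactorsTD (nums.getD e 0).natAbs, (q : Int) = p
          · rw [if_pos hex, if_pos ⟨hv0, hex⟩]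
          · rw [if_neg hex, if_neg (fun hh => hex hh.2)]
      refine ⟨?_, ?_, ?_, hbest⟩
      · rw [stepB_bz, h1, h3, Zf_succ]
      · rw [stepB_bnu, h2, h3, Uf_succ]
      · rw [stepB_dp, h1, h2, h3, dpV_succ, mstep_eq_cmin, ← crux nums (e + 1) (nums.getD e 0)]
        congr 1
        congr 1
        by_cases ha1 : (nums.getD e 0).natAbs = 1
        · simp only [if_pos ha1]
        · simp only [if_neg ha1]
          by_cases hv0 : nums.getD e 0 = 0
          · simp only [if_pos hv0]
            rw [Uf_succ]
          · simp only [if_neg hv0]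
            have hZ : Zf nums e = Zf nums (e + 1) := by rw [Zf_succ, if_neg hv0]
            have hb : ∀ q : Nat, ((primeFactorsTD (nums.getD e 0).natAbs).foldl
                (fun b (q : Nat) => b.insert (q : Int) (min (b.getD (q : Int) INFA) (dpV nums e))) st.1).getD (q : Int) INFA
                  = Bf nums (e + 1) (q : Int) := by
              intro q
              have := hbest (q : Int)
              rw [stepB_best, h3, if_neg hv0, if_neg hv0] at this
              exact this
            rw [hZ]
            rw [PySem.List.foldl_congr_mem _ _
              (fun m (q : Nat) => min m (Bf nums (e + 1) (q : Int))) (Zf nums (e + 1))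
              (fun acc q hq => by rw [hb q]), cmin_true]

theorem B_eq (nums : List Int) :
    valid_subarray_split_alt nums
      = if dpV nums nums.length = INFA then -1 else dpV nums nums.length := by
  obtain ⟨h1, h2, h3, h4⟩ := B_inv nums nums.length
  simp only [valid_subarray_split_alt]
  rw [show nums.foldl
      (fun (st : PySem.Dict Int Int × Int × Int × Int) v =>
        let best := st.1
        let bz := st.2.1
        let bnu := st.2.2.1
        let dp := st.2.2.2
        let a := v.natAbs
        let bnu := if a ≠ 1 then min bnu dp else bnu
        let fs := if v = 0 then ([] : List Nat) else primeFactorsTD a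
        let bz := if v = 0 then min bz dp else bz
        let best := if v = 0 then best
          else fs.foldl (fun b (p : Nat) => b.insert (p : Int) (min (b.getD (p : Int) INFA) dp)) best
        let m := if a = 1 then INFA
          else if v = 0 then bnu
          else fs.foldl (fun m (p : Nat) => min m (best.getD (p : Int) INFA)) bz
        (best, bz, bnu, min (m + 1) INFA))
      (PySem.Dict.empty, INFA, INFA, 0)
      = (List.range nums.length).foldl (stepB nums) (PySem.Dict.empty, INFA, INFA, 0) from by
    rw [foldl_index]
    rfl]
  rw [h3]

-- ===== VERDICT (by name: the statement is the Claim_ definition above) =====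
theorem valid_subarray_split_spec : Claim_equal_valid_subarray_split := by
  intro nums _
  unfold Spec_valid_subarray_split
  rw [A_eq, B_eq]
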